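-- pv_equiv track=rewrite | github.com/pablogarc2001/EjerciciosPython | ejemploestudio4.py | contar_pares_impares
-- ===== SOURCE A (Python) =====
-- def contar_pares_impares(matriz):
--     pares = 0
--     impares = 0
--     for fila in matriz:
--         for n in fila:
--             if n % 2  == 0:
--                 pares  += 1
--             else:
--                 impares +=1
--     return pares, impares
-- ===== SOURCE B (Python) =====
-- def contar_pares_impares(matriz):
--     pares = sum(1 for fila in matriz for n in fila if n % 2 == 0)
--     total = sum(len(fila) for fila in matriz)
--     return pares, total - pares
-- ===== Notes on version B (the rewrite author's own statement) =====
-- stated objective: simpler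
-- what changed: Replaces the two parallel counters maintained in a nested loop by a single counted quantity (evens, via a flat generator sum) plus the total element count, deriving the odd count by subtraction.
import Mathlib
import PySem

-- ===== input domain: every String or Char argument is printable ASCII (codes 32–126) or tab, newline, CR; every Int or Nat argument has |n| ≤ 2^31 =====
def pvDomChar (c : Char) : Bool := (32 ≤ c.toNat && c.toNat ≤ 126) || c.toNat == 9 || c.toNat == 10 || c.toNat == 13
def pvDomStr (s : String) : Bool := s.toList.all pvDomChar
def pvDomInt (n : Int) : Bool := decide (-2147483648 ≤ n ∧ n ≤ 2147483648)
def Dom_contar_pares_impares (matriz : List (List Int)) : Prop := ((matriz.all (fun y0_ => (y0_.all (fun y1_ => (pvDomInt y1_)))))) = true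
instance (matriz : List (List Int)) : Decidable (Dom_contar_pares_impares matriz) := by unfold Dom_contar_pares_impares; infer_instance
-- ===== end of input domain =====

-- B keeps one counter (evens) plus the total size and derives the odd count by subtraction; objective: simpler.

-- ===== PORT A =====
-- nested for-loops over (pares, impares)
def contar_pares_impares (matriz : List (List Int)) : Int × Int :=
  matriz.foldl
    (fun s fila =>
      fila.foldl
        (fun (s : Int × Int) n =>
          if n % 2 == 0 then (s.1 + 1, s.2) else (s.1, s.2 + 1))
        s)
    (0, 0)

-- ===== PORT B =====
-- pares = sum(1 for fila in matriz for n in fila if n % 2 == 0); total = sum(len(fila)); impares = total - pares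
def contar_pares_impares_alt (matriz : List (List Int)) : Int × Int :=
  let pares : Int := (matriz.map (fun fila => ((fila.filter (fun n => n % 2 == 0)).length : Int))).sum
  let total : Int := (matriz.map (fun fila => (fila.length : Int))).sum
  (pares, total - pares)

-- ===== PRECONDITION & SPEC =====
def Spec_contar_pares_impares (matriz : List (List Int)) (out : Int × Int) : Prop := out = contar_pares_impares_alt matriz
instance (matriz : List (List Int)) (out : Int × Int) : Decidable (Spec_contar_pares_impares matriz out) := by unfold Spec_contar_pares_impares; infer_instance

-- ===== CLAIM (what is proved, stated in full; the proofs are below) =====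
def Claim_equal_contar_pares_impares : Prop := ∀ (matriz : List (List Int)), Dom_contar_pares_impares matriz → Spec_contar_pares_impares matriz (contar_pares_impares matriz)

-- ===== LEMMAS AND PROOFS =====

-- inner loop invariant: a row adds its even count to pares and its odd count to impares
theorem pv_row (fila : List Int) (s : Int × Int) :
    fila.foldl
      (fun (s : Int × Int) n =>
        if n % 2 == 0 then (s.1 + 1, s.2) else (s.1, s.2 + 1)) s
    = (s.1 + ((fila.filter (fun n => n % 2 == 0)).length : Int),
       s.2 + ((fila.length : Int) - ((fila.filter (fun n => n % 2 == 0)).length : Int))) := by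
  induction fila generalizing s with
  | nil => simp
  | cons x xs ih =>
    rw [List.foldl_cons, ih]
    by_cases h : x % 2 == 0 <;>
      · simp only [h, if_true, List.filter_cons, List.length_cons, Prod.mk.injEq]
        constructor <;> push_cast [h] <;> ring

-- outer loop invariant
theorem pv_outer (matriz : List (List Int)) (s : Int × Int) :
    matriz.foldl
      (fun s fila =>
        fila.foldl
          (fun (s : Int × Int) n =>
            if n % 2 == 0 then (s.1 + 1, s.2) else (s.1, s.2 + 1)) s) s
    = (s.1 + (matriz.map (fun fila => ((fila.filter (fun n => n % 2 == 0)).length : Int))).sum,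
       s.2 + ((matriz.map (fun fila => (fila.length : Int))).sum
              - (matriz.map (fun fila => ((fila.filter (fun n => n % 2 == 0)).length : Int))).sum)) := by
  induction matriz generalizing s with
  | nil => simp
  | cons fila rest ih =>
    rw [List.foldl_cons, pv_row, ih]
    simp only [List.map_cons, List.sum_cons, Prod.mk.injEq]
    constructor <;> ring

-- ===== VERDICT (by name: the statement is the Claim_ definition above) =====
theorem contar_pares_impares_spec : Claim_equal_contar_pares_impares := by
  intro matriz _
  unfold Spec_contar_pares_impares contar_pares_impares contar_pares_impares_alt
  rw [pv_outer]
  simp
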